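-- pv_equiv track=rewrite | github.com/AnkeetaMitra/cursor | project/block_world_DFS.py | dfs
-- ===== SOURCE A (Python) =====
-- from typing import Set, List, Tuple
--
-- State = Set[str]
--
-- Action = Tuple[str, str, str]  # e.g., ("Stack", "C", "B")
--
-- def pickup(block: str, state: State) -> State | None:
--     pre = {f"On({block}, Table)", f"Clear({block})", "HandEmpty"}
--     if pre.issubset(state):
--         new = set(state)
--         new.remove(f"On({block}, Table)")
--         new.remove(f"Clear({block})")
--         new.remove("HandEmpty")
--         new.add(f"Holding({block})")
--         return new
--     return None
--
-- def putdown(block: str, state: State) -> State | None: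
--     pre = {f"Holding({block})"}
--     if pre.issubset(state):
--         new = set(state)
--         new.remove(f"Holding({block})")
--         new.add(f"On({block}, Table)")
--         new.add(f"Clear({block})")
--         new.add("HandEmpty")
--         return new
--     return None
--
-- def stack(block: str, target: str, state: State) -> State | None:
--     pre = {f"Holding({block})", f"Clear({target})"}
--     if block == target or not pre.issubset(state):
--         return None
--     new = set(state)
--     new.remove(f"Holding({block})")
--     new.remove(f"Clear({target})")
--     new.add(f"On({block}, {target})")
--     new.add(f"Clear({block})")
--     new.add("HandEmpty")
--     return new
--
-- def unstack(block: str, target: str, state: State) -> State | None: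
--     pre = {f"On({block}, {target})", f"Clear({block})", "HandEmpty"}
--     if block == target or not pre.issubset(state):
--         return None
--     new = set(state)
--     new.remove(f"On({block}, {target})")
--     new.remove(f"Clear({block})")
--     new.remove("HandEmpty")
--     new.add(f"Holding({block})")
--     new.add(f"Clear({target})")
--     return new
--
-- def get_possible_actions(state: State, blocks: List[str]) -> List[Tuple[str, str, str, State]]:
--     actions = []
--     for b in blocks:
--         a = pickup(b, state)
--         if a: actions.append(("PickUp", b, "", a))
--         a = putdown(b, state)
--         if a: actions.append(("PutDown", b, "", a))
--         for t in blocks: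
--             if b != t:
--                 a = stack(b, t, state)
--                 if a: actions.append(("Stack", b, t, a))
--                 a = unstack(b, t, state)
--                 if a: actions.append(("UnStack", b, t, a))
--     return actions
--
-- def dfs(initial: State, goal: State, blocks: List[str], depth_limit=100) -> Tuple[List[Action], State] | Tuple[None, None]:
--     stack = [(initial, [])]
--     visited = set()
--
--     while stack:
--         state, path = stack.pop()
--         fs = frozenset(state)
--         if fs in visited:
--             continue
--         visited.add(fs)
--
--         if goal.issubset(state):
--             return path, state
--
--         if len(path) >= depth_limit:
--             continue
--
--         for act in get_possible_actions(state, blocks):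
--             name, b1, b2, new_state = act
--             stack.append((new_state, path + [(name, b1, b2)]))
--
--     return None, None
-- ===== SOURCE B (Python) =====
-- from typing import Set, List, Tuple
--
-- State = Set[str]
-- Action = Tuple[str, str, str]
--
-- def pickup(block: str, state: State) -> State | None:
--     pre = {f"On({block}, Table)", f"Clear({block})", "HandEmpty"}
--     if pre.issubset(state):
--         new = set(state)
--         new.remove(f"On({block}, Table)")
--         new.remove(f"Clear({block})")
--         new.remove("HandEmpty")
--         new.add(f"Holding({block})")
--         return new
--     return None
--
-- def putdown(block: str, state: State) -> State | None:
--     pre = {f"Holding({block})"}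
--     if pre.issubset(state):
--         new = set(state)
--         new.remove(f"Holding({block})")
--         new.add(f"On({block}, Table)")
--         new.add(f"Clear({block})")
--         new.add("HandEmpty")
--         return new
--     return None
--
-- def stack(block: str, target: str, state: State) -> State | None:
--     pre = {f"Holding({block})", f"Clear({target})"}
--     if block == target or not pre.issubset(state):
--         return None
--     new = set(state)
--     new.remove(f"Holding({block})")
--     new.remove(f"Clear({target})")
--     new.add(f"On({block}, {target})")
--     new.add(f"Clear({block})")
--     new.add("HandEmpty")
--     return new
--
-- def unstack(block: str, target: str, state: State) -> State | None:
--     pre = {f"On({block}, {target})", f"Clear({block})", "HandEmpty"}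
--     if block == target or not pre.issubset(state):
--         return None
--     new = set(state)
--     new.remove(f"On({block}, {target})")
--     new.remove(f"Clear({block})")
--     new.remove("HandEmpty")
--     new.add(f"Holding({block})")
--     new.add(f"Clear({target})")
--     return new
--
-- def get_possible_actions(state: State, blocks: List[str]):
--     actions = []
--     for b in blocks:
--         a = pickup(b, state)
--         if a: actions.append(("PickUp", b, "", a))
--         a = putdown(b, state)
--         if a: actions.append(("PutDown", b, "", a))
--         for t in blocks:
--             if b != t:
--                 a = stack(b, t, state)
--                 if a: actions.append(("Stack", b, t, a))
--                 a = unstack(b, t, state)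
--                 if a: actions.append(("UnStack", b, t, a))
--     return actions
--
-- def dfs(initial: State, goal: State, blocks: List[str], depth_limit=100):
--     visited = set()
--
--     def rec(state, path):
--         fs = frozenset(state)
--         if fs in visited:
--             return None
--         visited.add(fs)
--         if goal.issubset(state):
--             return (path, state)
--         if len(path) >= depth_limit:
--             return None
--         for name, b1, b2, new_state in reversed(get_possible_actions(state, blocks)):
--             r = rec(new_state, path + [(name, b1, b2)])
--             if r is not None:
--                 return r
--         return None
--
--     r = rec(initial, [])
--     return r if r is not None else (None, None)
-- ===== Notes on version B (the rewrite author's own statement) =====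
-- stated objective: alternative
-- what changed: Replaces the explicit-stack while-loop with a recursive search helper that threads the shared visited set and recurses over the possible actions in reverse, preserving the LIFO exploration order and the first plan found.
import Mathlib
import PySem

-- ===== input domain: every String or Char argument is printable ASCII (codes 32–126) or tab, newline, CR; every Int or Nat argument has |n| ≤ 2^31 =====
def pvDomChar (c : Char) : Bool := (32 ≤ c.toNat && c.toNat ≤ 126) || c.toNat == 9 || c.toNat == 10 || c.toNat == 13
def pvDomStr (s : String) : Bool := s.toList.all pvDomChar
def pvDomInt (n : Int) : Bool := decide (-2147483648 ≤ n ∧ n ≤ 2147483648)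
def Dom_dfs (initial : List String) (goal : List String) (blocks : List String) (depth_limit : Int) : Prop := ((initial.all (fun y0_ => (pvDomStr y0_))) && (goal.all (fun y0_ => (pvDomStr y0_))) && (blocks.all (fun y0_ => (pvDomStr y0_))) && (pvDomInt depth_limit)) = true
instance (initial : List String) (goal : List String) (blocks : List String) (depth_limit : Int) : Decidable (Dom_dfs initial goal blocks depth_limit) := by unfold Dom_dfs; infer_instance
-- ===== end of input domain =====

-- B rewrites the explicit-stack DFS loop as a recursive search threading the visited set,
-- visiting the actions in reverse to realise the same LIFO exploration order (objective: alternative decomposition).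
-- The Python States are sets: the returned state list represents a set (order-insensitive).

-- ===== PORT A =====
-- shared module helpers (used verbatim by both A and B in the Python module)
def onFact (b t : String) : String := "On(" ++ b ++ ", " ++ t ++ ")"
def clearFact (b : String) : String := "Clear(" ++ b ++ ")"
def holdingFact (b : String) : String := "Holding(" ++ b ++ ")"

def pickup (b : String) (s : PySem.Set String) : Option (PySem.Set String) :=
  if PySem.Set.issubset (PySem.Set.ofList [onFact b "Table", clearFact b, "HandEmpty"]) s then
    some (PySem.Set.add
      (PySem.Set.discard (PySem.Set.discard (PySem.Set.discard s (onFact b "Table")) (clearFact b)) "HandEmpty")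
      (holdingFact b))
  else none

def putdown (b : String) (s : PySem.Set String) : Option (PySem.Set String) :=
  if PySem.Set.issubset (PySem.Set.ofList [holdingFact b]) s then
    some (PySem.Set.add (PySem.Set.add (PySem.Set.add
      (PySem.Set.discard s (holdingFact b))
      (onFact b "Table")) (clearFact b)) "HandEmpty")
  else none

def stackAct (b t : String) (s : PySem.Set String) : Option (PySem.Set String) :=
  if b == t || !(PySem.Set.issubset (PySem.Set.ofList [holdingFact b, clearFact t]) s) then none
  else
    some (PySem.Set.add (PySem.Set.add (PySem.Set.add
      (PySem.Set.discard (PySem.Set.discard s (holdingFact b)) (clearFact t))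
      (onFact b t)) (clearFact b)) "HandEmpty")

def unstackAct (b t : String) (s : PySem.Set String) : Option (PySem.Set String) :=
  if b == t || !(PySem.Set.issubset (PySem.Set.ofList [onFact b t, clearFact b, "HandEmpty"]) s) then none
  else
    some (PySem.Set.add (PySem.Set.add
      (PySem.Set.discard (PySem.Set.discard (PySem.Set.discard s (onFact b t)) (clearFact b)) "HandEmpty")
      (holdingFact b)) (clearFact t))

-- one entry of get_possible_actions: (name, b1, b2, new_state)
abbrev PvAct := String × String × String × PySem.Set String

def getPossibleActions (state : PySem.Set String) (blocks : List String) : List PvAct :=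
  blocks.foldl (fun acc b =>
    let acc := match pickup b state with
      | some a => acc ++ [("PickUp", b, "", a)]
      | none => acc
    let acc := match putdown b state with
      | some a => acc ++ [("PutDown", b, "", a)]
      | none => acc
    blocks.foldl (fun acc t =>
      if b != t then
        let acc := match stackAct b t state with
          | some a => acc ++ [("Stack", b, t, a)]
          | none => acc
        match unstackAct b t state with
          | some a => acc ++ [("UnStack", b, t, a)]
          | none => acc
      else acc) acc) []

-- ---- termination helpers for loopA (cited by its decreasing_by; kept with the ports on purpose) ----
theorem pvFoldLen {α β : Type} (K : Nat) (f : List α → β → List α)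
    (h : ∀ acc b, (f acc b).length ≤ acc.length + K) :
    ∀ (bs : List β) (acc : List α), (bs.foldl f acc).length ≤ acc.length + bs.length * K := by
  intro bs
  induction bs with
  | nil => intro acc; simp
  | cons b bs ih =>
    intro acc
    simp only [List.foldl_cons, List.length_cons, Nat.succ_mul]
    refine le_trans (ih (f acc b)) ?_
    have h1 := Nat.add_le_add_right (h acc b) (bs.length * K)
    calc (f acc b).length + bs.length * K ≤ acc.length + K + bs.length * K := h1
      _ = acc.length + (bs.length * K + K) := by rw [Nat.add_assoc, Nat.add_comm K]

theorem pvStepInner (state : PySem.Set String) (b t : String) (acc : List PvAct) :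
    (if b != t then
       let acc := match stackAct b t state with
         | some a => acc ++ [("Stack", b, t, a)]
         | none => acc
       match unstackAct b t state with
         | some a => acc ++ [("UnStack", b, t, a)]
         | none => acc
     else acc).length ≤ acc.length + 2 := by
  split
  · rcases hs : stackAct b t state with _ | a <;> rcases hu : unstackAct b t state with _ | a' <;>
      simp only [List.length_append, List.length_cons, List.length_nil] <;> omega
  · omega

theorem pvStepOuter (state : PySem.Set String) (blocks : List String) (b : String)
    (acc : List PvAct) :
    ((let acc := match pickup b state with
        | some a => acc ++ [("PickUp", b, "", a)]
        | none => acc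
      let acc := match putdown b state with
        | some a => acc ++ [("PutDown", b, "", a)]
        | none => acc
      blocks.foldl (fun acc t =>
        if b != t then
          let acc := match stackAct b t state with
            | some a => acc ++ [("Stack", b, t, a)]
            | none => acc
          match unstackAct b t state with
            | some a => acc ++ [("UnStack", b, t, a)]
            | none => acc
        else acc) acc) : List PvAct).length ≤ acc.length + (2 + 2 * blocks.length) := by
  rcases hp : pickup b state with _ | a <;> rcases hq : putdown b state with _ | a' <;>
    simp only [hp, hq] <;>
    refine le_trans (pvFoldLen 2 _ (fun acc t => pvStepInner state b t acc) blocks _) ?_ <;>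
    (try simp only [List.length_append, List.length_cons, List.length_nil]) <;> omega

theorem pvActionsLen (state : PySem.Set String) (blocks : List String) :
    (getPossibleActions state blocks).length ≤ blocks.length * (2 + 2 * blocks.length) := by
  unfold getPossibleActions
  have h := pvFoldLen (2 + 2 * blocks.length) _
    (fun acc b => pvStepOuter state blocks b acc) blocks []
  exact le_trans h (Nat.le_of_eq (Nat.zero_add _))

-- weight of a stack entry and measure of the whole stack (for loopA's termination)
def pvWeight (W : Nat) (d : Int) (e : PySem.Set String × List (String × String × String)) : Nat :=
  W ^ ((d - e.2.length).toNat + 1)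

def pvStackM (W : Nat) (d : Int) (stk : List (PySem.Set String × List (String × String × String))) : Nat :=
  (stk.map (pvWeight W d)).sum

theorem pvFoldPushM (W : Nat) (d : Int) (p : List (String × String × String))
    (acts : List PvAct) :
    ∀ rest, pvStackM W d (acts.foldl
        (fun st a => (a.2.2.2, p ++ [(a.1, a.2.1, a.2.2.1)]) :: st) rest)
      = acts.length * W ^ ((d - ((p.length + 1 : Nat) : Int)).toNat + 1) + pvStackM W d rest := by
  induction acts with
  | nil => intro rest; simp
  | cons a as ih =>
    intro rest
    simp only [List.foldl_cons, List.length_cons, Nat.succ_mul]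
    rw [ih]
    simp only [pvStackM, List.map_cons, List.sum_cons, pvWeight, List.length_append,
      List.length_cons, List.length_nil, Nat.zero_add]
    exact (Nat.add_assoc _ _ _).symm

theorem pvMeasPop (W : Nat) (d : Int) (s : PySem.Set String)
    (p : List (String × String × String))
    (rest : List (PySem.Set String × List (String × String × String))) (hW : 0 < W) :
    pvStackM W d rest < pvStackM W d ((s, p) :: rest) := by
  simp only [pvStackM, List.map_cons, List.sum_cons, pvWeight]
  exact Nat.lt_add_of_pos_left (Nat.pow_pos hW)

theorem pvToNatSucc (d : Int) (n : Nat) (h : (n : Int) < d) :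
    (d - ((n + 1 : Nat) : Int)).toNat + 1 = (d - (n : Int)).toNat := by
  have e1 : d - (n : Int) = (d - ((n + 1 : Nat) : Int)) + 1 := by push_cast; ring
  have hge : (0 : Int) ≤ d - ((n + 1 : Nat) : Int) :=
    sub_nonneg.mpr (by exact_mod_cast Int.add_one_le_iff.mpr h)
  rw [e1, Int.toNat_add hge zero_le_one, Int.toNat_one]

theorem pvMeasPush (blocks : List String) (d : Int) (s : PySem.Set String)
    (p : List (String × String × String))
    (rest : List (PySem.Set String × List (String × String × String)))
    (hp : (p.length : Int) < d) :
    pvStackM (blocks.length * (2 + 2 * blocks.length) + 1) d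
        ((getPossibleActions s blocks).foldl
          (fun st a => (a.2.2.2, p ++ [(a.1, a.2.1, a.2.2.1)]) :: st) rest)
      < pvStackM (blocks.length * (2 + 2 * blocks.length) + 1) d ((s, p) :: rest) := by
  rw [pvFoldPushM]
  simp only [pvStackM, List.map_cons, List.sum_cons, pvWeight]
  have hk : (getPossibleActions s blocks).length < blocks.length * (2 + 2 * blocks.length) + 1 :=
    Nat.lt_succ_of_le (pvActionsLen s blocks)
  have hpos : 0 < (blocks.length * (2 + 2 * blocks.length) + 1)
      ^ ((d - ((p.length + 1 : Nat) : Int)).toNat + 1) := Nat.pow_pos (Nat.succ_pos _)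
  have h2 := Nat.mul_lt_mul_of_lt_of_le hk
    (Nat.le_refl ((blocks.length * (2 + 2 * blocks.length) + 1)
      ^ ((d - ((p.length + 1 : Nat) : Int)).toNat + 1))) hpos
  have h3 : (blocks.length * (2 + 2 * blocks.length) + 1)
        * (blocks.length * (2 + 2 * blocks.length) + 1)
          ^ ((d - ((p.length + 1 : Nat) : Int)).toNat + 1)
      = (blocks.length * (2 + 2 * blocks.length) + 1)
          ^ (((d - ((p.length + 1 : Nat) : Int)).toNat + 1) + 1) :=
    (pow_succ' _ _).symm
  have h4 : ((d - ((p.length + 1 : Nat) : Int)).toNat + 1) + 1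
      = (d - (p.length : Int)).toNat + 1 := by rw [pvToNatSucc d p.length hp]
  rw [h3, h4] at h2
  exact Nat.add_lt_add_right h2 _

-- the while-loop of A: stack of (state, path), visited = list of already-seen state sets
def loopA (goal blocks : List String) (d : Int)
    (stk : List (PySem.Set String × List (String × String × String)))
    (v : List (PySem.Set String)) :
    (Option (List (String × String × String))) × Option (List String) :=
  match stk with
  | [] => (none, none)
  | (s, p) :: rest =>
    if v.any (fun t => PySem.Set.equal t s) then loopA goal blocks d rest v
    else
      let v' := v ++ [s]
      if PySem.Set.issubset goal s then (some p, some s)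
      else if h : (p.length : Int) ≥ d then loopA goal blocks d rest v'
      else loopA goal blocks d
        ((getPossibleActions s blocks).foldl
          (fun st a => (a.2.2.2, p ++ [(a.1, a.2.1, a.2.2.1)]) :: st) rest) v'
termination_by pvStackM (blocks.length * (2 + 2 * blocks.length) + 1) d stk
decreasing_by
  · exact pvMeasPop _ _ _ _ _ (Nat.succ_pos _)
  · exact pvMeasPop _ _ _ _ _ (Nat.succ_pos _)
  · exact pvMeasPush blocks d s p rest (Int.lt_of_not_ge h)

def dfs (initial : List String) (goal : List String) (blocks : List String) (depth_limit : Int) :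
    (Option (List (String × String × String))) × Option (List String) :=
  loopA goal blocks depth_limit [(PySem.Set.ofList initial, [])] []

-- ===== PORT B =====
-- termination helper for the recursive search (cited by its decreasing_by)
theorem pvDecFst (d : Int) (n : Nat) (h : (n : Int) < d) :
    (d - ((n + 1 : Nat) : Int)).toNat < (d - (n : Int)).toNat := by
  have h1 : d - ((n + 1 : Nat) : Int) < d - (n : Int) :=
    sub_lt_sub_left (by exact_mod_cast Nat.lt_succ_self n) d
  exact (Int.toNat_lt_toNat (sub_pos.mpr h)).mpr h1

-- recursive helper of B: returns (result, visited) — the Python shares one mutable visited set,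
-- which the port threads explicitly; tryActs is its inner for-loop over the reversed actions
mutual
def dfsRec (goal blocks : List String) (d : Int) (s : PySem.Set String)
    (p : List (String × String × String)) (v : List (PySem.Set String)) :
    (Option ((List (String × String × String)) × PySem.Set String)) × List (PySem.Set String) :=
  if v.any (fun t => PySem.Set.equal t s) then (none, v)
  else
    let v' := v ++ [s]
    if PySem.Set.issubset goal s then (some (p, s), v')
    else if h : (p.length : Int) ≥ d then (none, v')
    else tryActs goal blocks d (getPossibleActions s blocks).reverse p v'
termination_by ((d - p.length).toNat, 0, 0)
decreasing_by
  exact Prod.Lex.left _ _ (pvDecFst d p.length (Int.lt_of_not_ge h))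

def tryActs (goal blocks : List String) (d : Int) (acts : List PvAct)
    (p : List (String × String × String)) (v : List (PySem.Set String)) :
    (Option ((List (String × String × String)) × PySem.Set String)) × List (PySem.Set String) :=
  match acts with
  | [] => (none, v)
  | a :: rest =>
    match dfsRec goal blocks d a.2.2.2 (p ++ [(a.1, a.2.1, a.2.2.1)]) v with
    | (some r, v') => (some r, v')
    | (none, v') => tryActs goal blocks d rest p v'
termination_by ((d - ((p.length + 1 : Nat) : Int)).toNat, 1, acts.length)
decreasing_by
  · simp only [List.length_append, List.length_cons, List.length_nil, Nat.zero_add]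
    exact Prod.Lex.right _ (Prod.Lex.left _ _ Nat.zero_lt_one)
  · exact Prod.Lex.right _ (Prod.Lex.right _ (Nat.lt_succ_self _))
end

def dfs_alt (initial : List String) (goal : List String) (blocks : List String) (depth_limit : Int) :
    (Option (List (String × String × String))) × Option (List String) :=
  match (dfsRec goal blocks depth_limit (PySem.Set.ofList initial) [] []).1 with
  | some (p, s) => (some p, some s)
  | none => (none, none)

-- ===== PRECONDITION & SPEC =====
def Spec_dfs (initial : List String) (goal : List String) (blocks : List String) (depth_limit : Int) (out : (Option (List (String × String × String))) × Option (List String)) : Prop := out = dfs_alt initial goal blocks depth_limit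
instance (initial : List String) (goal : List String) (blocks : List String) (depth_limit : Int) (out : (Option (List (String × String × String))) × Option (List String)) : Decidable (Spec_dfs initial goal blocks depth_limit out) := by unfold Spec_dfs; infer_instance

-- ===== CLAIM (what is proved, stated in full; the proofs are below) =====
def Claim_equal_dfs : Prop := ∀ (initial : List String) (goal : List String) (blocks : List String) (depth_limit : Int), Dom_dfs initial goal blocks depth_limit → Spec_dfs initial goal blocks depth_limit (dfs initial goal blocks depth_limit)

-- ===== LEMMAS AND PROOFS =====

theorem pvFoldPushRev (p : List (String × String × String)) (acts : List PvAct) :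
    ∀ rest, acts.foldl (fun st a => (a.2.2.2, p ++ [(a.1, a.2.1, a.2.2.1)]) :: st) rest
      = acts.reverse.map (fun a => (a.2.2.2, p ++ [(a.1, a.2.1, a.2.2.1)])) ++ rest := by
  induction acts with
  | nil => intro rest; simp
  | cons a as ih => intro rest; simp [ih]

-- the bridge: popping one entry from A's stack behaves like one recursive call of B,
-- with B's final visited set carried on into the rest of A's loop
mutual
theorem pvBridge1 (goal blocks : List String) (d : Int) (s : PySem.Set String)
    (p : List (String × String × String)) (v : List (PySem.Set String))
    (rest : List (PySem.Set String × List (String × String × String))) :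
    loopA goal blocks d ((s, p) :: rest) v =
      (match dfsRec goal blocks d s p v with
       | (some (pp, ss), _) => (some pp, some ss)
       | (none, v') => loopA goal blocks d rest v') := by
  rw [loopA, dfsRec]
  by_cases hmem : v.any (fun t => PySem.Set.equal t s)
  · simp [hmem]
  · simp only [hmem, if_false, Bool.false_eq_true]
    by_cases hgoal : PySem.Set.issubset goal s
    · simp [hgoal]
    · simp only [hgoal, if_false, Bool.false_eq_true]
      by_cases hd : (p.length : Int) ≥ d
      · simp [hd]
      · simp only [hd, dif_neg, not_false_iff]
        rw [pvFoldPushRev]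
        exact pvBridge2 goal blocks d (getPossibleActions s blocks).reverse p (v ++ [s]) rest
          (by omega)
termination_by ((d - p.length).toNat, 0, 0)
decreasing_by
  all_goals (simp only [Prod.lex_def, List.length_append, List.length_cons, List.length_nil, true_and]; omega)

theorem pvBridge2 (goal blocks : List String) (d : Int) (acts : List PvAct)
    (p : List (String × String × String)) (v : List (PySem.Set String))
    (rest : List (PySem.Set String × List (String × String × String)))
    (hp : (p.length : Int) < d) :
    loopA goal blocks d
        (acts.map (fun a => (a.2.2.2, p ++ [(a.1, a.2.1, a.2.2.1)])) ++ rest) v =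
      (match tryActs goal blocks d acts p v with
       | (some (pp, ss), _) => (some pp, some ss)
       | (none, v') => loopA goal blocks d rest v') := by
  match acts with
  | [] => rw [tryActs]; simp
  | a :: as =>
    rw [tryActs]
    simp only [List.map_cons, List.cons_append]
    rw [pvBridge1 goal blocks d a.2.2.2 (p ++ [(a.1, a.2.1, a.2.2.1)]) v
      (as.map (fun a => (a.2.2.2, p ++ [(a.1, a.2.1, a.2.2.1)])) ++ rest)]
    rcases hres : dfsRec goal blocks d a.2.2.2 (p ++ [(a.1, a.2.1, a.2.2.1)]) v with ⟨r, v'⟩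
    rcases r with _ | ⟨pp, ss⟩
    · simp only
      exact pvBridge2 goal blocks d as p v' rest hp
    · simp only
termination_by ((d - ((p.length + 1 : Nat) : Int)).toNat, 1, acts.length)
decreasing_by
  all_goals (simp only [Prod.lex_def, List.length_append, List.length_cons, List.length_nil, true_and]; omega)
end

-- ===== VERDICT (by name: the statement is the Claim_ definition above) =====
theorem dfs_spec : Claim_equal_dfs := by
  intro initial goal blocks depth_limit _
  unfold Spec_dfs dfs dfs_alt
  rw [pvBridge1]
  rcases h : dfsRec goal blocks depth_limit (PySem.Set.ofList initial) [] [] with ⟨r, v'⟩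
  rcases r with _ | ⟨pp, ss⟩
  · simp [loopA]
  · simp
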